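-- pv_equiv track=rewrite | github.com/sweetysweets/Algorithm-Python | myclass/homework1/problem8.py | abs_test
-- ===== SOURCE A (Python) =====
-- def abs_test(a, b):
--     # 假设刚开始就是差值最小的
--     # 此时的差值绝对值为：
--     min = abs(sum(a) - sum(b))
--     # x,y分别为a,b列表的下标值
--     x = y = 0
--     # 当a的下标小于a的长度时，依次用b的每一个值和a的值交换
--     # 比较他们的差值绝对值的大小
--     while x < len(a):
--         # 依次用b的每一个值和当前a的值交换
--         while y < len(b):
--             a[x], b[y] = b[y], a[x]
--             # 交换后2个列表的差值绝对值
--             tmp = abs(sum(a) - sum(b))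
--             # 如果此时的差值小，则赋值给min
--             # 否则还将交换回去
--             if min >= tmp:
--                 min = tmp
--             else:
--                 a[x], b[y] = b[y], a[x]
--             y += 1
--         x += 1
--         y = 0
--     return min
-- ===== SOURCE B (Python) =====
-- # Faster: keeps the running sum difference incrementally (a kept swap changes it
-- # by 2*(bb[y]-cur)) and drops the 'a' list entirely -- A writes a[] only at the
-- # current index, which it never reads again, so a's element is carried as a scalar.
-- # Unlike A it does not mutate the caller's lists (equivalence is about the return value).
-- def abs_test(a, b):
--     bb = list(b)
--     d = sum(a) - sum(bb)
--     best = abs(d)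
--     for cur in a:
--         for y in range(len(bb)):
--             nd = d + 2 * (bb[y] - cur)
--             if abs(nd) <= best:
--                 best = abs(nd)
--                 bb[y], cur = cur, bb[y]
--                 d = nd
--     return best
-- ===== Notes on version B (the rewrite author's own statement) =====
-- stated objective: faster
-- what changed: Maintains the sum difference incrementally (a kept swap changes it by 2*(bb[y]-cur)) instead of resumming both lists per candidate swap, and eliminates the 'a' list entirely: A's writes to a[x] are dead stores, so a's current element is carried as a scalar while only b's copy is maintained.
import Mathlib
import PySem

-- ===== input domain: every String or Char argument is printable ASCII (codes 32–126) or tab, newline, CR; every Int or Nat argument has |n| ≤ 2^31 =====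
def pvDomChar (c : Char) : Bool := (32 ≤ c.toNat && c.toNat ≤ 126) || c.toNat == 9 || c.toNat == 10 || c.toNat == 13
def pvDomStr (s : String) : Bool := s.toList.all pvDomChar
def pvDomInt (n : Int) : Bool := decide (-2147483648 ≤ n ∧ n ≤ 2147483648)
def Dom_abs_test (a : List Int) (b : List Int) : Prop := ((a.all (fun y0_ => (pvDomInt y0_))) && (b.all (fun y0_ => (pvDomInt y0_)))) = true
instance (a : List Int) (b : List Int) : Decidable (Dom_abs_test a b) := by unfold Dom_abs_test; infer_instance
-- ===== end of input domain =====

-- B maintains the sum difference incrementally and drops the 'a' list (A's writes to a[x]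
-- are dead stores), carrying a's current element as a scalar; A mutates its argument lists
-- in place, B does not (the proved equivalence is about the return value only).

-- ===== PORT A =====
-- inner while loop of A: state (a, b, min); it runs while y < len(b), i.e. exactly
-- (len(b) - y) more times, encoded as the structurally decreasing fuel argument
def absInnerA (x : Nat) : List Int → List Int → Int → Nat → Nat → List Int × List Int × Int
  | aL, bL, mn, _y, 0 => (aL, bL, mn)
  | aL, bL, mn, y, fuel+1 =>
    -- a[x], b[y] = b[y], a[x]
    let av := aL.getD x 0
    let bv := bL.getD y 0
    let aL' := aL.set x bv
    let bL' := bL.set y av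
    let tmp := |aL'.sum - bL'.sum|
    if mn ≥ tmp then absInnerA x aL' bL' tmp (y+1) fuel
    else absInnerA x aL bL mn (y+1) fuel

-- outer while loop of A: runs while x < len(a), i.e. (len(a) - x) more times (fuel)
def absOuterA : List Int → List Int → Int → Nat → Nat → Int
  | _aL, _bL, mn, _x, 0 => mn
  | aL, bL, mn, x, fuel+1 =>
    match absInnerA x aL bL mn 0 bL.length with
    | (aL', bL', mn') => absOuterA aL' bL' mn' (x+1) fuel

def abs_test (a : List Int) (b : List Int) : Int :=
  absOuterA a b (|a.sum - b.sum|) 0 a.length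

-- ===== PORT B =====
-- inner for loop of B: state (cur, bb, d, best); d updated incrementally, no resummation;
-- returns (bb, d, best) (cur is local to one outer iteration and is discarded)
def altInner : Int → List Int → Int → Int → Nat → Nat → List Int × Int × Int
  | _cur, bL, d, best, _y, 0 => (bL, d, best)
  | cur, bL, d, best, y, fuel+1 =>
    let bv := bL.getD y 0
    let nd := d + 2 * (bv - cur)
    if |nd| ≤ best then altInner bv (bL.set y cur) nd (|nd|) (y+1) fuel
    else altInner cur bL d best (y+1) fuel

-- outer for loop of B: structural recursion over the elements of a
def altOuter : List Int → List Int → Int → Int → Int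
  | [], _bL, _d, best => best
  | cur :: rest, bL, d, best =>
    match altInner cur bL d best 0 bL.length with
    | (bL', d', best') => altOuter rest bL' d' best'

def abs_test_alt (a : List Int) (b : List Int) : Int :=
  altOuter a b (a.sum - b.sum) (|a.sum - b.sum|)

-- ===== PRECONDITION & SPEC =====
def Spec_abs_test (a : List Int) (b : List Int) (out : Int) : Prop := out = abs_test_alt a b
instance (a : List Int) (b : List Int) (out : Int) : Decidable (Spec_abs_test a b out) := by unfold Spec_abs_test; infer_instance

-- ===== CLAIM =====
def Claim_equal_abs_test : Prop := ∀ (a : List Int) (b : List Int), Dom_abs_test a b → Spec_abs_test a b (abs_test a b)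

-- ===== LEMMAS AND PROOFS =====

theorem sum_set_int (l : List Int) (n : Nat) (v : Int) (h : n < l.length) :
    (l.set n v).sum = l.sum - l.getD n 0 + v := by
  induction l generalizing n with
  | nil => simp at h
  | cons hd tl ih =>
    cases n with
    | zero => simp [List.sum_cons]; ring
    | succ k =>
      simp only [List.set, List.sum_cons, List.getD_cons_succ]
      rw [ih k (by simpa using h)]
      ring

theorem innerA_len (x : Nat) (fuel : Nat) :
    ∀ (aL bL : List Int) (mn : Int) (y : Nat),
      (absInnerA x aL bL mn y fuel).1.length = aL.length ∧
      (absInnerA x aL bL mn y fuel).2.1.length = bL.length := by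
  induction fuel with
  | zero => intro aL bL mn y; exact ⟨rfl, rfl⟩
  | succ fuel ih =>
    intro aL bL mn y
    rw [absInnerA]
    split
    · have := ih (aL.set x (bL.getD y 0)) (bL.set y (aL.getD x 0))
        (|(aL.set x (bL.getD y 0)).sum - (bL.set y (aL.getD x 0)).sum|) (y+1)
      exact ⟨this.1.trans (by simp), this.2.trans (by simp)⟩
    · exact ih aL bL mn (y+1)

-- A's inner loop writes aL only at index x: elements past x are untouched
theorem innerA_drop (x : Nat) (fuel : Nat) :
    ∀ (aL bL : List Int) (mn : Int) (y : Nat),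
      (absInnerA x aL bL mn y fuel).1.drop (x+1) = aL.drop (x+1) := by
  induction fuel with
  | zero => intro aL bL mn y; rfl
  | succ fuel ih =>
    intro aL bL mn y
    rw [absInnerA]
    split
    · rw [ih]
      rw [List.drop_set]
      simp
    · exact ih aL bL mn (y+1)

-- inner loops agree: B's scalar state (cur, d) mirrors A's (aL.getD x 0, sums)
theorem inner_eq (x : Nat) (fuel : Nat) :
    ∀ (aL bL : List Int) (mn : Int) (y : Nat), x < aL.length → y + fuel ≤ bL.length →
    altInner (aL.getD x 0) bL (aL.sum - bL.sum) mn y fuel =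
      ((absInnerA x aL bL mn y fuel).2.1,
       (absInnerA x aL bL mn y fuel).1.sum - (absInnerA x aL bL mn y fuel).2.1.sum,
       (absInnerA x aL bL mn y fuel).2.2) := by
  induction fuel with
  | zero => intro aL bL mn y _ _; rw [absInnerA, altInner]
  | succ fuel ih =>
    intro aL bL mn y hx hy
    have hyb : y < bL.length := by omega
    have hsum : (aL.set x (bL.getD y 0)).sum - (bL.set y (aL.getD x 0)).sum
        = (aL.sum - bL.sum) + 2 * (bL.getD y 0 - aL.getD x 0) := by
      rw [sum_set_int aL x (bL.getD y 0) hx, sum_set_int bL y (aL.getD x 0) hyb]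
      ring
    have hcur : (aL.set x (bL.getD y 0)).getD x 0 = bL.getD y 0 := by
      simp [List.getD_eq_getElem?_getD, hx]
    rw [absInnerA, altInner]
    simp only [← hsum]
    by_cases hc : |(aL.set x (bL.getD y 0)).sum - (bL.set y (aL.getD x 0)).sum| ≤ mn
    · rw [if_pos hc, if_pos hc]
      have h2 := ih (aL.set x (bL.getD y 0)) (bL.set y (aL.getD x 0))
        (|(aL.set x (bL.getD y 0)).sum - (bL.set y (aL.getD x 0)).sum|) (y+1)
        (by simpa using hx) (by simp only [List.length_set]; omega)
      rw [hcur] at h2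
      exact h2
    · rw [if_neg hc, if_neg hc]
      exact ih _ _ _ _ hx (by omega)

-- outer loops agree: B folds over aL.drop x while A keeps the index x with fuel
theorem outer_eq (fuel : Nat) :
    ∀ (aL bL : List Int) (mn : Int) (x : Nat), x + fuel = aL.length →
    altOuter (aL.drop x) bL (aL.sum - bL.sum) mn = absOuterA aL bL mn x fuel := by
  induction fuel with
  | zero =>
    intro aL bL mn x hx
    rw [List.drop_of_length_le (by omega), absOuterA, altOuter]
  | succ fuel ih =>
    intro aL bL mn x hx
    have hxl : x < aL.length := by omega
    have hdrop : aL.drop x = aL.getD x 0 :: aL.drop (x+1) := by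
      rw [List.drop_eq_getElem_cons hxl]
      simp [List.getD_eq_getElem?_getD, hxl]
    rw [hdrop, altOuter, absOuterA]
    rw [inner_eq x bL.length aL bL mn 0 hxl (by omega)]
    have hlen := (innerA_len x bL.length aL bL mn 0).1
    have hd := innerA_drop x bL.length aL bL mn 0
    rw [← hd]
    exact ih _ _ _ (x+1) (by omega)

-- ===== VERDICT =====
theorem abs_test_spec : Claim_equal_abs_test := by
  intro a b _
  unfold Spec_abs_test abs_test abs_test_alt
  exact (outer_eq a.length a b (|a.sum - b.sum|) 0 (by omega)).symm
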